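-- pv_equiv track=rewrite | github.com/coockoo/adventofcode | 2023/14/__main__.py | part1
-- ===== SOURCE A (Python) =====
-- def transpose(rows: list[str]) -> list[str]:
--     return [''.join([r[i] for r in rows]) for i in range(len(rows[0]))]
--
-- def part1(rows: list[str]) -> int:
--     res = 0
--     cols = transpose(rows)
--     for col in cols:
--         w = len(col)
--         for idx, c in enumerate(col):
--             if c == 'O':
--                 res += w
--                 w -= 1
--             if c == '#':
--                 w = len(col) - idx - 1
--     return res
-- ===== SOURCE B (Python) =====
-- def part1(rows: list[str]) -> int:
--     height = len(rows)
--     total = 0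
--     for i in range(len(rows[0])):
--         col = [r[i] for r in rows]
--         start = 0
--         k = 0
--         for idx, c in enumerate(col):
--             if c == '#':
--                 total += k * (height - start) - k * (k - 1) // 2
--                 k = 0
--                 start = idx + 1
--             elif c == 'O':
--                 k += 1
--         total += k * (height - start) - k * (k - 1) // 2
--     return total
-- ===== Notes on version B (the rewrite author's own statement) =====
-- stated objective: alternative
-- what changed: Replaces A's transpose plus per-cell running-weight bookkeeping (w decremented at each 'O', reset at each '#') by splitting each column into maximal runs between '#' and adding each run's load with the closed-form arithmetic series k*(height-start) - k*(k-1)//2.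
import Mathlib
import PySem

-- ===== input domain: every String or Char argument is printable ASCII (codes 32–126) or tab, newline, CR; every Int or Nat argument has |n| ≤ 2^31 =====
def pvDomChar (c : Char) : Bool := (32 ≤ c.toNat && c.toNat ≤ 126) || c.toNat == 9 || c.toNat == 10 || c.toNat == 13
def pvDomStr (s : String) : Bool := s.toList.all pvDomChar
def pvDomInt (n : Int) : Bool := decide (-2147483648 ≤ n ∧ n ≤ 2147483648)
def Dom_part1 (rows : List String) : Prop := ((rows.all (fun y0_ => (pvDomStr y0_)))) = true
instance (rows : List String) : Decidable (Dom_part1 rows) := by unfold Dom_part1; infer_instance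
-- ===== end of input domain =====

-- B replaces A's transpose + per-cell running-weight bookkeeping by a per-run closed-form
-- arithmetic series (alternative decomposition, same asymptotic cost).

-- ===== PORT A =====
-- r[i] : Python raises IndexError when out of range; Pre_part1 excludes those inputs,
-- so the ' ' default of getD is never reached on admitted inputs.
def pvColChars (rows : List String) (i : Int) : List Char :=
  rows.map (fun r => (PySem.Str.pyGet? r i).getD ' ')

-- ''.join([r[i] for r in rows]) ported as String.ofList of the char list (exact: join of 1-char strings)
def pvTranspose (rows : List String) : List String :=
  (PySem.List.pyRange 0 (PySem.Str.len ((PySem.List.pyGet? rows 0).getD "")) 1).map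
    (fun i => String.ofList (pvColChars rows i))

-- one step of A's inner loop: state (res, w), both ifs checked in Python's order
def pvStepA (n : Int) (st : Int × Int) (p : Int × Char) : Int × Int :=
  let st1 := if p.2 = 'O' then (st.1 + st.2, st.2 - 1) else st
  if p.2 = '#' then (st1.1, n - p.1 - 1) else st1

def part1 (rows : List String) : Int :=
  (pvTranspose rows).foldl
    (fun res col =>
      let n : Int := PySem.Str.len col
      ((PySem.List.enumerate col.toList 0).foldl (pvStepA n) (res, n)).1)
    0

-- ===== PORT B =====
-- one step of B's inner loop: state (acc, start, k); at '#' the finished run's load is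
-- added in closed form k*(height-start) - k*(k-1)//2
def pvStepB (height : Int) (st : Int × Int × Int) (p : Int × Char) : Int × Int × Int :=
  if p.2 = '#' then
    (st.1 + st.2.2 * (height - st.2.1) - PySem.Int.floordiv (st.2.2 * (st.2.2 - 1)) 2,
     p.1 + 1, 0)
  else if p.2 = 'O' then (st.1, st.2.1, st.2.2 + 1)
  else st

def part1_alt (rows : List String) : Int :=
  let height : Int := rows.length
  (PySem.List.pyRange 0 (PySem.Str.len ((PySem.List.pyGet? rows 0).getD "")) 1).foldl
    (fun total i =>
      let col := rows.map (fun r => (PySem.Str.pyGet? r i).getD ' ')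
      let fin := (PySem.List.enumerate col 0).foldl (pvStepB height) (0, 0, 0)
      total + fin.1 + fin.2.2 * (height - fin.2.1)
        - PySem.Int.floordiv (fin.2.2 * (fin.2.2 - 1)) 2)
    0

-- ===== PRECONDITION & SPEC =====
-- Pre_ excludes exactly the inputs where Python A raises IndexError: the empty list
-- (rows[0]) and ragged input where some row is shorter than rows[0] (r[i] in transpose).
def Pre_part1 (rows : List String) : Prop :=
  rows ≠ [] ∧ ∀ r ∈ rows, PySem.Str.len ((PySem.List.pyGet? rows 0).getD "") ≤ PySem.Str.len r

instance (rows : List String) : Decidable (Pre_part1 rows) := by unfold Pre_part1; infer_instance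

def pvWitness_part1 : List String := ["O.#", "..O", "#.."]

def Spec_part1 (rows : List String) (out : Int) : Prop := out = part1_alt rows
instance (rows : List String) (out : Int) : Decidable (Spec_part1 rows out) := by unfold Spec_part1; infer_instance

-- ===== CLAIM (what is proved, stated in full; the proofs are below) =====
def Claim_equal_part1 : Prop := ∀ (rows : List String), Dom_part1 rows → Pre_part1 rows → Spec_part1 rows (part1 rows)

-- ===== LEMMAS AND PROOFS =====

-- load of one run: k rocks rolling to the top of a run starting at row `start`
def pvLoad (n start k : Int) : Int :=
  k * (n - start) - PySem.Int.floordiv (k * (k - 1)) 2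

theorem pvLoad_zero (n s : Int) : pvLoad n s 0 = 0 := by
  simp [pvLoad, PySem.Int.floordiv]

theorem pvLoad_succ (n s k : Int) : pvLoad n s (k + 1) = pvLoad n s k + (n - s - k) := by
  have h : PySem.Int.floordiv ((k + 1) * k) 2 = PySem.Int.floordiv (k * (k - 1)) 2 + k := by
    have h2 : (k + 1) * k = k * (k - 1) + k * 2 := by ring
    rw [h2, PySem.Int.floordiv, PySem.Int.floordiv, Int.add_mul_fdiv_right _ _ (by norm_num)]
  simp only [pvLoad]
  rw [show (k + 1) * (k + 1 - 1) = (k + 1) * k by ring, h]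
  ring

-- the inner-loop invariant: A's (res, w) fold is determined by B's (acc, start, k) fold
theorem pvFold_eq (n : Int) (cs : List Char) :
    ∀ (s res acc start k : Int),
    (PySem.List.enumerate cs s).foldl (pvStepA n) (res, n - start - k)
    = (res + ((PySem.List.enumerate cs s).foldl (pvStepB n) (acc, start, k)).1 - acc
         + pvLoad n ((PySem.List.enumerate cs s).foldl (pvStepB n) (acc, start, k)).2.1
                    ((PySem.List.enumerate cs s).foldl (pvStepB n) (acc, start, k)).2.2
         - pvLoad n start k,
       n - ((PySem.List.enumerate cs s).foldl (pvStepB n) (acc, start, k)).2.1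
         - ((PySem.List.enumerate cs s).foldl (pvStepB n) (acc, start, k)).2.2) := by
  induction cs with
  | nil => intro s res acc start k; simp [PySem.List.enumerate_nil]
  | cons c cs ih =>
    intro s res acc start k
    rw [PySem.List.enumerate_cons]
    simp only [List.foldl_cons]
    by_cases hh : c = '#'
    · have hA : pvStepA n (res, n - start - k) (s, c) = (res, n - (s + 1) - 0) := by
        simp [pvStepA, hh]; ring
      have hB : pvStepB n (acc, start, k) (s, c)
          = (acc + pvLoad n start k, s + 1, 0) := by
        simp [pvStepB, hh, pvLoad]; ring
      rw [hA, hB, ih (s + 1) res (acc + pvLoad n start k) (s + 1) 0]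
      simp only [Prod.mk.injEq, and_true]
      rw [pvLoad_zero]; ring
    · by_cases hO : c = 'O'
      · have hA : pvStepA n (res, n - start - k) (s, c)
            = (res + (n - start - k), n - start - (k + 1)) := by
          simp [pvStepA, hO]; ring
        have hB : pvStepB n (acc, start, k) (s, c) = (acc, start, k + 1) := by
          simp [pvStepB, hO]
        rw [hA, hB, ih (s + 1) (res + (n - start - k)) acc start (k + 1)]
        simp only [Prod.mk.injEq, and_true]
        rw [pvLoad_succ]; ring
      · have hA : pvStepA n (res, n - start - k) (s, c) = (res, n - start - k) := by
          simp [pvStepA, hO, hh]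
        have hB : pvStepB n (acc, start, k) (s, c) = (acc, start, k) := by
          simp [pvStepB, hO, hh]
        rw [hA, hB, ih (s + 1) res acc start k]

-- one column: A's fold starting at (res, n) returns res plus B's column total
theorem pvCol_eq (n : Int) (cs : List Char) (res : Int) :
    ((PySem.List.enumerate cs 0).foldl (pvStepA n) (res, n)).1
    = res + ((PySem.List.enumerate cs 0).foldl (pvStepB n) (0, 0, 0)).1
        + ((PySem.List.enumerate cs 0).foldl (pvStepB n) (0, 0, 0)).2.2
          * (n - ((PySem.List.enumerate cs 0).foldl (pvStepB n) (0, 0, 0)).2.1)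
        - PySem.Int.floordiv
            (((PySem.List.enumerate cs 0).foldl (pvStepB n) (0, 0, 0)).2.2
              * (((PySem.List.enumerate cs 0).foldl (pvStepB n) (0, 0, 0)).2.2 - 1)) 2 := by
  have h := pvFold_eq n cs 0 res 0 0 0
  rw [show n - 0 - 0 = n by ring] at h
  rw [h]
  simp [pvLoad]
  ring

-- ===== VERDICT (by name: the statement is the Claim_ definition above) =====
theorem part1_spec : Claim_equal_part1 := by
  intro rows _ _
  unfold Spec_part1 part1 part1_alt pvTranspose
  rw [List.foldl_map]
  congr 1
  funext res i
  have hlen : PySem.Str.len (String.ofList (rows.map (fun r => (PySem.Str.pyGet? r i).getD ' ')))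
      = ((rows.length : Nat) : Int) := by
    simp [PySem.Str.len_eq]
  simp only [pvColChars, String.toList_ofList]
  rw [pvCol_eq, hlen]
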